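-- pv_equiv track=rewrite | github.com/giuseppetanzi/schema_test | script2.py | old_combine
-- ===== SOURCE A (Python) =====
-- from itertools import combinations
--
-- def old_combine(names):
--     lns = names.split()
--     lns.sort()
--     comb = []
--     for i in range(lns.__len__()):
--         comb += combinations(lns, i+1)
--     comb_list = [ list(t) for t in comb ]
--     comb_strings = []
--     for elem in comb_list:
--         result = ""
--         for elem2 in elem:
--             result += (elem2 + ",")
--
--         result = result[:-1]
--         comb_strings.append(result)
--     return comb_strings
-- ===== SOURCE B (Python) =====
-- def old_combine(names):
--     words = sorted(names.split())
--
--     def go(ws, k, prefix):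
--         # all size-k combinations of ws, each already comma-joined onto prefix
--         if k == 0:
--             return [prefix]
--         if not ws:
--             return []
--         head, rest = ws[0], ws[1:]
--         joined = head if prefix == "" else prefix + "," + head
--         return go(rest, k - 1, joined) + go(rest, k, prefix)
--
--     out = []
--     for k in range(1, len(words) + 1):
--         out += go(words, k, "")
--     return out
-- ===== Notes on version B (the rewrite author's own statement) =====
-- stated objective: alternative
-- what changed: Replaces itertools.combinations plus a join-then-strip-trailing-comma pass with a single recursive backtracking generator that extends a comma-joined prefix string while choosing or skipping each word, emitting finished strings directly (no intermediate tuple/list of combinations).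
import Mathlib
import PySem

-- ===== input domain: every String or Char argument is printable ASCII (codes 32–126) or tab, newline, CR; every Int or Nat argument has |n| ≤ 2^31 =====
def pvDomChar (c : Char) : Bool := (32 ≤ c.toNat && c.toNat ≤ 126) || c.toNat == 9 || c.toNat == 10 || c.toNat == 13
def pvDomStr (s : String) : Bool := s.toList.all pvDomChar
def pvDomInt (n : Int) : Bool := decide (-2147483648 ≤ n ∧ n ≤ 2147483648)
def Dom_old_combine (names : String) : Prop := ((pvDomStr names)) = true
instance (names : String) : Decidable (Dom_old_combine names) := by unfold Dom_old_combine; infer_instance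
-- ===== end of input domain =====

-- B replaces itertools.combinations + join-then-strip-comma by one recursive backtracking
-- generator that emits the comma-joined strings directly (objective: alternative, same cost).

-- ===== PORT A =====
def old_combine (names : String) : List String :=
  let lns := PySem.Str.split₀ names
  let lns := PySem.List.sorted lns (fun x => x) false
  let comb := (PySem.List.pyRange 0 (lns.length : Int) 1).foldl
      (fun acc i => acc ++ PySem.List.combinations lns (i.toNat + 1)) []
  let comb_list := comb.map (fun t => t)   -- [ list(t) for t in comb ]
  comb_list.foldl (fun comb_strings elem =>
    let result := elem.foldl (fun r e2 => r ++ (e2 ++ ",")) ""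
    let result := PySem.Str.slice result none (some (-1))   -- result[:-1]
    comb_strings ++ [result]) []

-- ===== PORT B =====
def goAlt : List String → Nat → String → List String
  | _, 0, pre => [pre]
  | [], _ + 1, _ => []
  | head :: rest, k + 1, pre =>
      let joined := if pre == "" then head else pre ++ "," ++ head
      goAlt rest k joined ++ goAlt rest (k + 1) pre

def old_combine_alt (names : String) : List String :=
  let words := PySem.List.sorted (PySem.Str.split₀ names) (fun x => x) false
  (PySem.List.pyRange 1 ((words.length : Int) + 1) 1).foldl
    (fun out k => out ++ goAlt words k.toNat "") []

-- ===== PRECONDITION & SPEC =====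
def Spec_old_combine (names : String) (out : List String) : Prop := out = old_combine_alt names
instance (names : String) (out : List String) : Decidable (Spec_old_combine names out) := by unfold Spec_old_combine; infer_instance

-- ===== CLAIM (what is proved, stated in full; the proofs are below) =====
def Claim_equal_old_combine : Prop := ∀ (names : String), Dom_old_combine names → Spec_old_combine names (old_combine names)

-- ===== LEMMAS AND PROOFS =====

-- the accumulator view of B's prefix-extension step
def glue (p : String) (c : List String) : String :=
  c.foldl (fun p w => if p == "" then w else p ++ "," ++ w) p

theorem goAlt_eq_map_glue (ws : List String) (k : Nat) (p : String) :
    goAlt ws k p = (PySem.List.combinations ws k).map (glue p) := by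
  induction ws generalizing k p with
  | nil =>
      cases k with
      | zero => simp [goAlt, PySem.List.combinations_zero, glue]
      | succ k => simp [goAlt, PySem.List.combinations_nil_succ]
  | cons w rest ih =>
      cases k with
      | zero => simp [goAlt, PySem.List.combinations_zero, glue]
      | succ k =>
          simp only [goAlt, PySem.List.combinations_cons_succ, List.map_append, List.map_map, ih]
          congr 1

theorem split₀go_ne_nil (s cur : List Char) (acc : List (List Char))
    (hacc : ∀ t ∈ acc, t ≠ []) :
    ∀ t ∈ PySem.Chars.split₀.go s cur acc, t ≠ [] := by
  induction s generalizing cur acc with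
  | nil =>
      intro t ht
      by_cases h : cur.isEmpty = true
      · simp only [PySem.Chars.split₀.go, h, if_true] at ht
        exact hacc t (List.mem_reverse.mp ht)
      · simp only [PySem.Chars.split₀.go, h] at ht
        rcases List.mem_cons.mp (List.mem_reverse.mp ht) with h1 | h1
        · subst h1; simpa [List.isEmpty_iff] using h
        · exact hacc t h1
  | cons c rest ih =>
      intro t ht
      by_cases hs : PySem.Chars.isspace c = true
      · by_cases h : cur.isEmpty = true
        · simp only [PySem.Chars.split₀.go, hs, h, if_true] at ht
          exact ih [] acc hacc t ht
        · simp only [PySem.Chars.split₀.go, hs, h, if_true] at ht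
          refine ih [] (cur.reverse :: acc) ?_ t ht
          intro u hu
          rcases List.mem_cons.mp hu with hu | hu
          · subst hu; simpa [List.isEmpty_iff] using h
          · exact hacc u hu
      · simp only [PySem.Chars.split₀.go, hs] at ht
        exact ih (c :: cur) acc hacc t ht

theorem split₀_tokens_ne (names : String) : ∀ t ∈ PySem.Str.split₀ names, t ≠ "" := by
  intro t ht
  simp only [PySem.Str.split₀, List.mem_map] at ht
  obtain ⟨l, hl, rfl⟩ := ht
  have hne : l ≠ [] :=
    split₀go_ne_nil names.toList [] [] (by intro t ht; cases ht) l
      (by simpa [PySem.Chars.split₀] using hl)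
  intro h
  apply hne
  have := congrArg String.toList h
  simpa using this

theorem foldl_comma_of_ne (c : List String) :
    ∀ p : String, p ≠ "" →
      c.foldl (fun r e2 => r ++ (e2 ++ ",")) (p ++ ",") = glue p c ++ "," := by
  induction c with
  | nil => intro p _; simp [glue]
  | cons e c ih =>
      intro p hp
      have hpe : p ++ "," ++ e ≠ "" := by
        intro h
        have := congrArg String.toList h
        simp at this
      have hstep : (p ++ ",") ++ (e ++ ",") = (p ++ "," ++ e) ++ "," := by
        simp [String.append_assoc]
      have hglue : glue p (e :: c) = glue (p ++ "," ++ e) c := by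
        simp [glue, hp]
      rw [List.foldl_cons, hstep, ih _ hpe, hglue]

theorem render_eq_glue (c : List String) (hne : c ≠ []) (h : ∀ w ∈ c, w ≠ "") :
    PySem.Str.slice (c.foldl (fun r e2 => r ++ (e2 ++ ",")) "") none (some (-1)) = glue "" c := by
  obtain ⟨e, c', rfl⟩ : ∃ e c', c = e :: c' := by
    cases c with
    | nil => exact absurd rfl hne
    | cons e c' => exact ⟨e, c', rfl⟩
  have he : e ≠ "" := h e (by simp)
  have h1 : (e :: c').foldl (fun r e2 => r ++ (e2 ++ ",")) "" = glue "" (e :: c') ++ "," := by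
    have h0 : ("" : String) ++ (e ++ ",") = e ++ "," := by simp
    have hg : glue "" (e :: c') = glue e c' := by simp [glue]
    rw [List.foldl_cons, h0, hg, foldl_comma_of_ne c' e he]
  rw [h1]
  -- strip the trailing comma:  (X ++ ",")[:-1] = X
  apply String.toList_injective
  simp [PySem.List.slice_to_neg_one]

theorem core_eq (ws : List String) (hwords : ∀ w ∈ ws, w ≠ "") :
    (((PySem.List.pyRange 0 (ws.length : Int) 1).foldl
        (fun acc i => acc ++ PySem.List.combinations ws (i.toNat + 1)) []).map (fun t => t)).foldl
      (fun comb_strings elem =>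
        comb_strings ++ [PySem.Str.slice (elem.foldl (fun r e2 => r ++ (e2 ++ ",")) "") none (some (-1))]) []
    = (PySem.List.pyRange 1 ((ws.length : Int) + 1) 1).foldl
        (fun out k => out ++ goAlt ws k.toNat "") [] := by
  rw [List.map_id']
  rw [PySem.List.foldl_append_eq_flatMap, PySem.List.foldl_append_eq_flatMap,
    PySem.List.foldl_append_eq_flatMap, ← List.map_eq_flatMap]
  rw [PySem.List.pyRange_one, PySem.List.pyRange_one]
  simp only [List.nil_append, List.flatMap_map, List.map_flatMap]
  have hlen : ((ws.length : Int) + 1 - 1).toNat = ((ws.length : Int) - 0).toNat := by omega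
  rw [hlen]
  apply List.flatMap_congr
  intro j _
  have hA : ((0 : Int) + (j : Int)).toNat + 1 = j + 1 := by omega
  have hB : ((1 : Int) + (j : Int)).toNat = j + 1 := by omega
  rw [hA, hB, goAlt_eq_map_glue]
  apply List.map_congr_left
  intro c hc
  have hlenc : c.length = j + 1 := PySem.List.length_of_mem_combinations hc
  have hcne : c ≠ [] := by intro h; simp [h] at hlenc
  have hsub : ∀ w ∈ c, w ∈ ws := fun w hw =>
    (PySem.List.sublist_of_mem_combinations hc).mem hw
  exact render_eq_glue c hcne (fun w hw => hwords w (hsub w hw))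

-- ===== VERDICT (by name: the statement is the Claim_ definition above) =====
theorem old_combine_spec : Claim_equal_old_combine := by
  intro names _
  have h : ∀ w ∈ PySem.List.sorted (PySem.Str.split₀ names) (fun x => x) false, w ≠ "" :=
    fun w hw => split₀_tokens_ne names w ((PySem.List.mem_sorted _ _ _ _).mp hw)
  exact core_eq _ h
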